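-- pv_equiv track=rewrite | github.com/awslabs/LISA | lambda/utilities/bedrock_kb_discovery.py | generate_collection_id
-- ===== SOURCE A (Python) =====
-- def generate_collection_id(data_source_name: str) -> str:
--     """Generate a valid collection ID from a data source name.
--
--     Converts the data source name to lowercase, replaces spaces and underscores
--     with hyphens, and removes invalid characters.
--
--     Args:
--         data_source_name: Data source name to convert
--
--     Returns:
--         Valid collection ID (lowercase alphanumeric with hyphens)
--     """
--     # Convert to lowercase
--     collection_id = data_source_name.lower()
--
--     # Replace spaces and underscores with hyphens
--     collection_id = collection_id.replace(" ", "-").replace("_", "-")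
--
--     # Remove invalid characters (keep only alphanumeric and hyphens)
--     collection_id = "".join(c for c in collection_id if c.isalnum() or c == "-")
--
--     # Remove leading/trailing hyphens and collapse multiple hyphens
--     collection_id = "-".join(filter(None, collection_id.split("-")))
--
--     # Ensure it's not empty
--     if not collection_id:
--         collection_id = "collection"
--
--     return collection_id
-- ===== SOURCE B (Python) =====
-- def generate_collection_id(data_source_name: str) -> str:
--     """Single linear pass: emit kept chars, collapsing separator runs into
--     at most one hyphen between words, never at the edges."""
--     out = []
--     pending = False
--     for c in data_source_name.lower():
--         if c.isalnum():
--             if out and pending: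
--                 out.append("-")
--             out.append(c)
--             pending = False
--         elif c in " _-":
--             pending = True
--     return "".join(out) or "collection"
-- ===== Notes on version B (the rewrite author's own statement) =====
-- stated objective: simpler
-- what changed: Replaces A's four-stage string pipeline (lower, two replaces, filter-join, split/filter/join) by one fused linear pass with a pending-separator flag that emits each kept character exactly once.
import Mathlib
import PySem

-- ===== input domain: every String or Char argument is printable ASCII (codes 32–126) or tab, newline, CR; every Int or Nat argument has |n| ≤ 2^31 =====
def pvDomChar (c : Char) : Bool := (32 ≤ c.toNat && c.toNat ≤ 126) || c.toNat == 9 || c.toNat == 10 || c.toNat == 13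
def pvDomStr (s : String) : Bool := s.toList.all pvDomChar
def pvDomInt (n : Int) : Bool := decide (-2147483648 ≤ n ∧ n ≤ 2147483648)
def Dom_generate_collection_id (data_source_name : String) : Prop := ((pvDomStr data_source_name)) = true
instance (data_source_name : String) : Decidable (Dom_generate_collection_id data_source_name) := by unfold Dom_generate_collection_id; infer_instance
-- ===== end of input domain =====

-- B fuses A's four-stage string pipeline into one linear pass with a
-- pending-separator flag (objective: simpler).

-- ===== PORT A =====
def generate_collection_id (data_source_name : String) : String :=
  let c1 := PySem.Str.lower data_source_name
  let c2 := PySem.Str.replace (PySem.Str.replace c1 " " "-") "_" "-"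
  let c3 := c2.toList.filter (fun c => PySem.Chars.isalnum c || c == '-')
  -- collection_id.split("-"): sep is the non-empty literal "-", ported at the char-list level
  let parts := PySem.Chars.splitOn c3 ['-']
  -- "-".join(filter(None, parts))
  let c4 := PySem.Chars.join ['-'] (parts.filter (fun p => !p.isEmpty))
  if c4.isEmpty then "collection" else String.ofList c4

-- ===== PORT B =====
-- loop body of Source B: state = (out, pending)
def pvAltStep (st : List Char × Bool) (c : Char) : List Char × Bool :=
  if PySem.Chars.isalnum c then
    ((if !st.1.isEmpty && st.2 then st.1 ++ ['-'] else st.1) ++ [c], false)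
  else if c == ' ' || c == '_' || c == '-' then
    (st.1, true)
  else st

def generate_collection_id_alt (data_source_name : String) : String :=
  let out := (((PySem.Str.lower data_source_name).toList).foldl pvAltStep ([], false)).1
  if out.isEmpty then "collection" else String.ofList out

-- ===== PRECONDITION & SPEC =====
def Spec_generate_collection_id (data_source_name : String) (out : String) : Prop := out = generate_collection_id_alt data_source_name
instance (data_source_name : String) (out : String) : Decidable (Spec_generate_collection_id data_source_name out) := by unfold Spec_generate_collection_id; infer_instance

-- ===== CLAIM (what is proved, stated in full; the proofs are below) =====
def Claim_equal_generate_collection_id : Prop := ∀ (data_source_name : String), Dom_generate_collection_id data_source_name → Spec_generate_collection_id data_source_name (generate_collection_id data_source_name)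

-- ===== LEMMAS AND PROOFS =====

def pvClassify (c : Char) : Option Char :=
  if PySem.Chars.isalnum c then some c
  else if c == ' ' || c == '_' || c == '-' then some '-'
  else none

def pvSp : List Char → List (List Char)
  | [] => [[]]
  | c :: t =>
    if c = '-' then [] :: pvSp t
    else match pvSp t with
      | g :: gs => (c :: g) :: gs
      | [] => [[c]]

def pvCanon : Bool → List Char → List Char
  | _, [] => []
  | b, c :: t =>
    if c = '-' then
      if b then (match pvCanon false t with | [] => [] | r => '-' :: r)
      else pvCanon false t
    else c :: pvCanon true t

def pvPref (r : List (List Char)) : List Char :=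
  match r with
  | [] => []
  | _ => '-' :: List.intercalate ['-'] r

theorem pvFiltered_eq (L : List Char) :
    ((L.map (fun c => if ' ' = c then '-' else c)).map
        (fun c => if '_' = c then '-' else c)).filter
      (fun c => PySem.Chars.isalnum c || c == '-') = L.filterMap pvClassify := by
  induction L with
  | nil => rfl
  | cons c t ih =>
    simp only [List.map_cons, List.filter_cons, List.filterMap_cons]
    by_cases h1 : PySem.Chars.isalnum c = true
    · have hs : c ≠ ' ' := by rintro rfl; revert h1; decide
      have hu : c ≠ '_' := by rintro rfl; revert h1; decide
      rw [if_neg (Ne.symm hs), if_neg (Ne.symm hu)]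
      have hcl : pvClassify c = some c := by simp [pvClassify, h1]
      have hp : (PySem.Chars.isalnum c || c == '-') = true := by simp [h1]
      simp only [hcl, hp, if_true]
      rw [ih]
    · by_cases h2 : c = ' ' ∨ c = '_' ∨ c = '-'
      · have : (if '_' = (if ' ' = c then '-' else c) then '-' else (if ' ' = c then '-' else c)) = '-' := by
          rcases h2 with rfl | rfl | rfl <;> decide
        rw [this]
        have hcl : pvClassify c = some '-' := by
          rcases h2 with rfl | rfl | rfl <;> decide
        have hp : (PySem.Chars.isalnum '-' || '-' == '-') = true := by decide
        simp only [hcl, hp, if_true]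
        rw [ih]
      · push_neg at h2
        obtain ⟨hs, hu, hh⟩ := h2
        rw [if_neg (Ne.symm hs), if_neg (Ne.symm hu)]
        have hb : (c == ' ' || c == '_' || c == '-') = false := by
          simp [hs, hu, hh]
        have hcl : pvClassify c = none := by simp [pvClassify, h1, hb]
        have hp : (PySem.Chars.isalnum c || c == '-') = false := by simp [h1, hh]
        simp only [hcl, hp, Bool.false_eq_true, if_false]
        rw [ih]

theorem pvSp_ne_nil (M : List Char) : pvSp M ≠ [] := by
  cases M with
  | nil => simp [pvSp]
  | cons c t =>
    simp only [pvSp]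
    split
    · simp
    · split <;> simp

theorem pvGo_single (a b : Char) (L : List Char) : ∀ (fuel : Nat) (acc : List Char), L.length ≤ fuel →
    PySem.Chars.replace.go [a] [b] fuel L acc = acc.reverse ++ L.map (fun c => if a = c then b else c) := by
  induction L with
  | nil => intro fuel acc h; cases fuel <;> simp [PySem.Chars.replace.go]
  | cons c t ih =>
    intro fuel acc h
    cases fuel with
    | zero => simp at h
    | succ f =>
      simp only [PySem.Chars.replace.go, List.isPrefixOf, List.map_cons]
      by_cases hac : a = c
      · simp only [hac, beq_self_eq_true, Bool.true_and, if_pos]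
        subst hac
        rw [show List.drop [a].length (a :: t) = t from rfl, ih f _ (by simpa using h)]
        simp
      · have : (a == c) = false := by simp [hac]
        simp only [this, Bool.false_and, if_neg Bool.false_ne_true]
        rw [ih f _ (by simpa using h)]
        simp [hac]

theorem pvReplace_single (a b : Char) (L : List Char) :
    PySem.Chars.replace L [a] [b] = L.map (fun c => if a = c then b else c) := by
  simp [PySem.Chars.replace, pvGo_single a b L L.length [] le_rfl]


theorem pvSplitGo (L : List Char) : ∀ (fuel : Nat) (cur : List Char) (acc : List (List Char)),
    L.length < fuel →
    PySem.Chars.splitOn.go ['-'] fuel L cur acc =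
      acc.reverse ++ (pvSp L).modifyHead (fun g => cur.reverse ++ g) := by
  induction L with
  | nil =>
    intro fuel cur acc h
    cases fuel with
    | zero => omega
    | succ f => simp [PySem.Chars.splitOn.go, pvSp]
  | cons c t ih =>
    intro fuel cur acc h
    cases fuel with
    | zero => omega
    | succ f =>
      simp only [PySem.Chars.splitOn.go, List.isPrefixOf]
      by_cases hc : c = '-'
      · subst hc
        simp only [beq_self_eq_true, Bool.true_and]
        simp only [if_true]
        rw [show List.drop ['-'].length ('-' :: t) = t from rfl,
          ih f _ _ (by simpa using h)]
        simp only [pvSp, if_pos rfl]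
        rcases pvSp t with _ | ⟨g, gs⟩ <;> simp
      · have hbe : ('-' == c) = false := by simp [Ne.symm hc]
        simp only [hbe, Bool.false_and, if_neg Bool.false_ne_true]
        rw [ih f _ _ (by simpa using h)]
        simp only [pvSp, if_neg hc]
        rcases hg : pvSp t with _ | ⟨g, gs⟩
        · exact absurd hg (pvSp_ne_nil t)
        · simp

theorem pvSplitOn_eq (M : List Char) : PySem.Chars.splitOn M ['-'] = pvSp M := by
  rw [PySem.Chars.splitOn, pvSplitGo M (M.length + 1) [] [] (by omega)]
  rcases h : pvSp M with _ | ⟨g, gs⟩ <;> simp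


theorem pvGood (L : List Char) :
    ∀ c ∈ L.filterMap pvClassify, c = '-' ∨ PySem.Chars.isalnum c = true := by
  intro c hc
  rw [List.mem_filterMap] at hc
  obtain ⟨a, _, ha⟩ := hc
  unfold pvClassify at ha
  split at ha
  · rename_i h; right; rw [Option.some.injEq] at ha; rw [← ha]; exact h
  · split at ha
    · left; rw [Option.some.injEq] at ha; exact ha.symm
    · exact absurd ha (by simp)

theorem pvIc_cons (x : List Char) (r : List (List Char)) :
    List.intercalate ['-'] (x :: r) = x ++ pvPref r := by
  cases r with
  | nil => simp [pvPref, List.intercalate]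
  | cons y r' => simp [pvPref, List.intercalate]

theorem pvIc_ne_nil (r : List (List Char)) (h : ∀ p ∈ r, p ≠ []) (hr : r ≠ []) :
    List.intercalate ['-'] r ≠ [] := by
  cases r with
  | nil => exact absurd rfl hr
  | cons x r' =>
    rw [pvIc_cons]
    have := h x (by simp)
    simp [this]

theorem pvSp_dash (t : List Char) : pvSp ('-' :: t) = [] :: pvSp t := by
  simp [pvSp]

theorem pvCanon_dash_false (t : List Char) : pvCanon false ('-' :: t) = pvCanon false t := by
  simp [pvCanon]

theorem pvCanon_dash_true (t : List Char) :
    pvCanon true ('-' :: t) = match pvCanon false t with | [] => [] | r => '-' :: r := by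
  simp [pvCanon]

theorem pvCanon_ndash (b : Bool) (c : Char) (t : List Char) (h : c ≠ '-') :
    pvCanon b (c :: t) = c :: pvCanon true t := by
  simp [pvCanon, h]

theorem pvJoin_pair (M : List Char) :
    List.intercalate ['-'] ((pvSp M).filter (fun p => !p.isEmpty)) = pvCanon false M ∧
    (∀ g gs, pvSp M = g :: gs →
      g ++ pvPref (gs.filter (fun p => !p.isEmpty)) = pvCanon true M) := by
  induction M with
  | nil =>
    constructor
    · simp [pvSp, pvCanon, List.intercalate]
    · intro g gs hg
      simp [pvSp] at hg
      obtain ⟨rfl, rfl⟩ := hg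
      simp [pvPref, pvCanon]
  | cons c t ih =>
    by_cases hc : c = '-'
    · subst hc
      have hQ : pvPref ((pvSp t).filter (fun p => !p.isEmpty)) = pvCanon true ('-' :: t) := by
        rw [pvCanon_dash_true]
        rcases hf : (pvSp t).filter (fun p => !p.isEmpty) with _ | ⟨x, r'⟩
        · have h0 : pvCanon false t = [] := by rw [← ih.1, hf]; simp [List.intercalate]
          rw [hf, h0]
          simp [pvPref]
        · have hne : List.intercalate ['-'] (x :: r') ≠ [] := by
            apply pvIc_ne_nil
            · intro p hp
              have : p ∈ (pvSp t).filter (fun p => !p.isEmpty) := hf ▸ hp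
              simp at this
              simpa using this.2
            · simp
          have h1 : pvCanon false t = List.intercalate ['-'] (x :: r') := by rw [← ih.1, hf]
          rcases hi : List.intercalate ['-'] (x :: r') with _ | ⟨y, l⟩
          · exact absurd hi hne
          · rw [hf, h1, hi]
            simp [pvPref, ← hi]
      constructor
      · rw [pvSp_dash, pvCanon_dash_false, List.filter_cons]
        simpa using ih.1
      · intro g gs hg
        rw [pvSp_dash] at hg
        injection hg with h1 h2
        subst h1; subst h2
        simpa using hQ
    · rcases hsp : pvSp t with _ | ⟨g0, gs0⟩
      · exact absurd hsp (pvSp_ne_nil t)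
      · have hQt := ih.2 g0 gs0 hsp
        have hsp' : pvSp (c :: t) = (c :: g0) :: gs0 := by
          simp [pvSp, hc, hsp]
        have hQ : ∀ g gs, pvSp (c :: t) = g :: gs →
            g ++ pvPref (gs.filter (fun p => !p.isEmpty)) = pvCanon true (c :: t) := by
          intro g gs hg
          rw [hsp'] at hg
          injection hg with h1 h2
          subst h1; subst h2
          rw [pvCanon_ndash true c t hc, List.cons_append, hQt]
        refine ⟨?_, hQ⟩
        rw [hsp', List.filter_cons]
        have hkeep : (!(c :: g0).isEmpty) = true := by simp
        rw [if_pos hkeep, pvIc_cons, pvCanon_ndash false c t hc, List.cons_append, hQt]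

theorem pvFold_classify (L : List Char) : ∀ st : List Char × Bool,
    L.foldl pvAltStep st = (L.filterMap pvClassify).foldl pvAltStep st := by
  induction L with
  | nil => intro st; rfl
  | cons c t ih =>
    intro st
    simp only [List.foldl_cons, List.filterMap_cons]
    by_cases h1 : PySem.Chars.isalnum c = true
    · have hcl : pvClassify c = some c := by simp [pvClassify, h1]
      rw [hcl]
      simp only [List.foldl_cons]
      exact ih _
    · by_cases h2 : (c == ' ' || c == '_' || c == '-') = true
      · have hcl : pvClassify c = some '-' := by simp [pvClassify, h1, h2]
        have hfa : PySem.Chars.isalnum '-' = false := by decide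
        have hstep : pvAltStep st c = pvAltStep st '-' := by
          simp [pvAltStep, h1, h2, hfa]
        rw [hcl]
        simp only [List.foldl_cons]
        rw [hstep]
        exact ih _
      · have hcl : pvClassify c = none := by simp [pvClassify, h1, h2]
        have hstep : pvAltStep st c = st := by simp [pvAltStep, h1, h2]
        rw [hcl, hstep]
        exact ih _

theorem pvFold_canon (M : List Char) (h : ∀ c ∈ M, c = '-' ∨ PySem.Chars.isalnum c = true) :
    ∀ (out : List Char) (pending : Bool),
    (M.foldl pvAltStep (out, pending)).1 =
      if out = [] then pvCanon false M
      else out ++ (if pending then (match pvCanon false M with | [] => [] | r => '-' :: r)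
                   else pvCanon true M) := by
  induction M with
  | nil =>
    intro out pending
    by_cases ho : out = [] <;> by_cases hp : pending <;> simp [ho, hp, pvCanon]
  | cons c t ih =>
    intro out pending
    have ht : ∀ c ∈ t, c = '-' ∨ PySem.Chars.isalnum c = true :=
      fun x hx => h x (List.mem_cons_of_mem _ hx)
    rcases h c (List.mem_cons_self ..) with rfl | halnum
    · have hfa : PySem.Chars.isalnum '-' = false := by decide
      have hstep : pvAltStep (out, pending) '-' = (out, true) := by
        simp [pvAltStep, hfa]
      rw [List.foldl_cons, hstep, ih ht out true]
      by_cases ho : out = [] <;> by_cases hp : pending <;>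
        simp [ho, hp, pvCanon_dash_false, pvCanon_dash_true]
    · have hc : c ≠ '-' := by rintro rfl; revert halnum; decide
      have hstep : pvAltStep (out, pending) c =
          ((if !out.isEmpty && pending then out ++ ['-'] else out) ++ [c], false) := by
        simp [pvAltStep, halnum]
      rw [List.foldl_cons, hstep, ih ht _ false]
      have hne : (if !out.isEmpty && pending then out ++ ['-'] else out) ++ [c] ≠ [] := by simp
      rw [if_neg hne, if_neg (Bool.false_ne_true), pvCanon_ndash false c t hc]
      by_cases ho : out = [] <;> by_cases hp : pending <;>
        simp [ho, hp, pvCanon_ndash true c t hc]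

-- ===== VERDICT (by name: the statement is the Claim_ definition above) =====
theorem generate_collection_id_spec : Claim_equal_generate_collection_id := by
  intro s _
  show generate_collection_id s = generate_collection_id_alt s
  unfold generate_collection_id generate_collection_id_alt
  have hsp : (" " : String).toList = [' '] := by decide
  have hun : ("_" : String).toList = ['_'] := by decide
  have hda : ("-" : String).toList = ['-'] := by decide
  have hc2 : (PySem.Str.replace (PySem.Str.replace (PySem.Str.lower s) " " "-") "_" "-").toList
      = (((PySem.Str.lower s).toList.map (fun c => if ' ' = c then '-' else c)).map
          (fun c => if '_' = c then '-' else c)) := by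
    simp only [PySem.Str.toList_replace, hsp, hun, hda]
    rw [pvReplace_single, pvReplace_single]
  have hM : (PySem.Str.replace (PySem.Str.replace (PySem.Str.lower s) " " "-") "_" "-").toList.filter
        (fun c => PySem.Chars.isalnum c || c == '-')
      = (PySem.Str.lower s).toList.filterMap pvClassify := by
    rw [hc2, pvFiltered_eq]
  have hA : PySem.Chars.join ['-']
        ((PySem.Chars.splitOn ((PySem.Str.replace (PySem.Str.replace (PySem.Str.lower s) " " "-") "_" "-").toList.filter
            (fun c => PySem.Chars.isalnum c || c == '-')) ['-']).filter (fun p => !p.isEmpty))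
      = pvCanon false ((PySem.Str.lower s).toList.filterMap pvClassify) := by
    rw [hM, pvSplitOn_eq]
    exact (pvJoin_pair _).1
  have hB : (((PySem.Str.lower s).toList).foldl pvAltStep ([], false)).1
      = pvCanon false ((PySem.Str.lower s).toList.filterMap pvClassify) := by
    rw [pvFold_classify, pvFold_canon _ (pvGood _) [] false]
    simp
  simp only [hA, hB]
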